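-- pv_equiv track=rewrite | github.com/ualberta-smr/PyMigBench | v2/code/pymigstat/datamodels/migration.py | serialize_line_list
-- ===== SOURCE A (Python) =====
-- def serialize_line_list(lines: list[int], append_count=True):
--     if not lines:
--         return "(0)" if append_count else ""
--     lines = sorted(lines)
--     chunks = []
--     start, end = lines[0], lines[0]
--     for current in lines[1:]:
--         if current == end + 1:
--             end = current
--         else:
--             # end last chunk
--             chunks.append((start, end))
--             start, end = current, current
--
--     chunks.append((start, end))
--
--     def chunk_to_str(chunk):
--         if chunk[0] == chunk[1]:
--             return str(chunk[0])
--         return f"{chunk[0]}-{chunk[1]}"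
--
--     to_str = ",".join(chunk_to_str(c) for c in chunks)
--     if append_count:
--         to_str += f" ({len(lines)})"
--
--     return to_str
-- ===== SOURCE B (Python) =====
-- from itertools import groupby
--
--
-- def serialize_line_list(lines: list[int], append_count=True):
--     if not lines:
--         return "(0)" if append_count else ""
--     srt = sorted(lines)
--     parts = []
--     for _, grp in groupby(enumerate(srt), key=lambda pair: pair[1] - pair[0]):
--         g = list(grp)
--         first, last = g[0][1], g[-1][1]
--         parts.append(str(first) if first == last else f"{first}-{last}")
--     out = ",".join(parts)
--     if append_count:
--         out += f" ({len(lines)})"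
--     return out
-- ===== Notes on version B (the rewrite author's own statement) =====
-- stated objective: idiomatic
-- what changed: Replaces the hand-rolled start/end accumulator loop with itertools.groupby over enumerate(sorted) keyed by value-minus-index, so each maximal consecutive run is one group whose first/last elements give the range.
import Mathlib
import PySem

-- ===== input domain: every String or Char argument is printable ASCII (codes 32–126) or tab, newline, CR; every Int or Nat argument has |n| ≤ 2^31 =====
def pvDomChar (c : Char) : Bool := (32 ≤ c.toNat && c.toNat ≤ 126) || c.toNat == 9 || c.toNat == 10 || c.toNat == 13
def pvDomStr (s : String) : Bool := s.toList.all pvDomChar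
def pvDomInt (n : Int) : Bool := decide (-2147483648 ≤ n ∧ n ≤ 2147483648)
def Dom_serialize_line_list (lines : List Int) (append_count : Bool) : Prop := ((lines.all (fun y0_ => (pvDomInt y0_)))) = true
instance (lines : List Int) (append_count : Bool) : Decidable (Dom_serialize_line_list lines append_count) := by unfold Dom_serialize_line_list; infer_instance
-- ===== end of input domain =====

-- B groups the sorted list with groupby keyed by value-minus-index instead of A's start/end accumulator loop; same output.

-- ===== PORT A =====
-- chunk_to_str, producing List Char (strings are built on List Char throughout; String.ofList at the end)
def pvChunkToChars (c : Int × Int) : List Char :=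
  if c.1 = c.2 then PySem.Int.toChars c.1
  else PySem.Int.toChars c.1 ++ '-' :: PySem.Int.toChars c.2

def pvCountSuffix (n : Int) : List Char := ' ' :: '(' :: (PySem.Int.toChars n ++ [')'])

def serialize_line_list (lines : List Int) (append_count : Bool) : String :=
  if lines = [] then (if append_count then "(0)" else "") else
  let s := PySem.List.sorted lines id false
  -- start, end = lines[0], lines[0]; for current in lines[1:]: …
  let st0 := PySem.List.pyGetD s 0 0
  let res := (PySem.List.slice s (some 1) none).foldl
    (fun (acc : List (Int × Int) × Int × Int) current =>
      if current = acc.2.2 + 1 then (acc.1, acc.2.1, current)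
      else (acc.1 ++ [(acc.2.1, acc.2.2)], current, current))
    ([], st0, st0)
  let chunks := res.1 ++ [(res.2.1, res.2.2)]
  let to_str := PySem.Chars.join [','] (chunks.map pvChunkToChars)
  String.ofList (if append_count then to_str ++ pvCountSuffix (PySem.List.len s) else to_str)

-- ===== PORT B =====
-- first/last element of a groupby group, projected to the value component (groups are nonempty)
def pvFirstLast (g : List (Int × Int)) : Int × Int :=
  ((g.head?.getD (0, 0)).2, (g.getLast?.getD (0, 0)).2)

-- itertools.groupby(enumerate(srt), key=pair[1]-pair[0]) ported as List.splitBy on key equality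
def serialize_line_list_alt (lines : List Int) (append_count : Bool) : String :=
  if lines = [] then (if append_count then "(0)" else "") else
  let srt := PySem.List.sorted lines id false
  let groups := (PySem.List.enumerate srt 0).splitBy
      (fun p q => p.2 - p.1 == q.2 - q.1)
  let parts := groups.map (fun g =>
    let fl := pvFirstLast g
    if fl.1 = fl.2 then PySem.Int.toChars fl.1
    else PySem.Int.toChars fl.1 ++ '-' :: PySem.Int.toChars fl.2)
  let out := PySem.Chars.join [','] parts
  String.ofList (if append_count then out ++ pvCountSuffix (PySem.List.len lines) else out)

-- ===== PRECONDITION & SPEC =====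
def Spec_serialize_line_list (lines : List Int) (append_count : Bool) (out : String) : Prop := out = serialize_line_list_alt lines append_count
instance (lines : List Int) (append_count : Bool) (out : String) : Decidable (Spec_serialize_line_list lines append_count out) := by unfold Spec_serialize_line_list; infer_instance

-- ===== CLAIM (what is proved, stated in full; the proofs are below) =====
def Claim_equal_serialize_line_list : Prop := ∀ (lines : List Int) (append_count : Bool), Dom_serialize_line_list lines append_count → Spec_serialize_line_list lines append_count (serialize_line_list lines append_count)

-- ===== LEMMAS AND PROOFS =====

-- reference chunking: split a list at every point where the next value is not prev+1
def pvChunksOf (start en : Int) : List Int → List (Int × Int)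
  | [] => [(start, en)]
  | c :: rest => if c = en + 1 then pvChunksOf start c rest
                 else (start, en) :: pvChunksOf c c rest

theorem pvFoldl_eq_chunksOf (rest : List Int) :
    ∀ (chunks : List (Int × Int)) (start en : Int),
      (let r := rest.foldl
        (fun (acc : List (Int × Int) × Int × Int) current =>
          if current = acc.2.2 + 1 then (acc.1, acc.2.1, current)
          else (acc.1 ++ [(acc.2.1, acc.2.2)], current, current))
        (chunks, start, en);
       r.1 ++ [(r.2.1, r.2.2)]) = chunks ++ pvChunksOf start en rest := by
  induction rest with
  | nil => intro chunks start en; simp [pvChunksOf]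
  | cons c rest ih =>
    intro chunks start en
    simp only [List.foldl_cons, pvChunksOf]
    by_cases h : c = en + 1
    · simp [h, ih]
    · simp [h, ih]

theorem pvLoop_eq_chunksOf (rest : List Int) :
    ∀ (i x : Int) (r : List (Int × Int)) (acc : List (List (Int × Int))),
      (List.splitBy.loop (fun p q => p.2 - p.1 == q.2 - q.1)
          (PySem.List.enumerate rest (i + 1)) (i, x) r acc).map pvFirstLast
        = (acc.map pvFirstLast).reverse ++ pvChunksOf ((r.getLast?.getD (i, x)).2) x rest := by
  induction rest with
  | nil =>
    intro i x r acc
    simp [PySem.List.enumerate, List.splitBy.loop, pvChunksOf, pvFirstLast,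
      List.head?_reverse]
  | cons c rest ih =>
    intro i x r acc
    rw [PySem.List.enumerate_cons]
    simp only [List.splitBy.loop]
    by_cases h : c = x + 1
    · have hb : ((x - i == c - (i + 1)) : Bool) = true := by
        exact beq_iff_eq.mpr (by omega)
      simp only [hb]
      have := ih (i + 1) c ((i, x) :: r) acc
      rw [show (i + 1 + 1 : Int) = i + 2 by ring] at this ⊢
      rw [this]
      have hl : (((i, x) :: r).getLast?.getD (i + 1, c)).2
          = (r.getLast?.getD (i, x)).2 := by
        cases r with
        | nil => simp
        | cons a as =>
          cases hl : (a :: as).getLast? with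
          | none => simp [List.getLast?_eq_none_iff] at hl
          | some p => simp [List.getLast?_cons_cons, hl]
      rw [hl, pvChunksOf, if_pos h]
    · have hb : ((x - i == c - (i + 1)) : Bool) = false := by
        simp; omega
      simp only [hb]
      have := ih (i + 1) c [] (((i, x) :: r).reverse :: acc)
      rw [show (i + 1 + 1 : Int) = i + 2 by ring] at this ⊢
      rw [this]
      rw [pvChunksOf, if_neg h]
      simp [pvFirstLast, List.head?_reverse]

theorem pvSorted_ne_nil {lines : List Int} (h : lines ≠ []) :
    PySem.List.sorted lines id false ≠ [] := by
  simpa [PySem.List.sorted_eq_nil_iff] using h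

-- ===== VERDICT (by name: the statement is the Claim_ definition above) =====
theorem serialize_line_list_spec : Claim_equal_serialize_line_list := by
  intro lines append_count _
  unfold Spec_serialize_line_list serialize_line_list serialize_line_list_alt
  by_cases hnil : lines = []
  · simp [hnil]
  · simp only [if_neg hnil]
    set s := PySem.List.sorted lines id false with hs
    have hsne : s ≠ [] := pvSorted_ne_nil hnil
    obtain ⟨x, rest, hcons⟩ := List.exists_cons_of_ne_nil hsne
    have hlen : s.length = lines.length :=
      (PySem.List.sorted_perm lines id false).length_eq
    -- A's chunk list = B's mapped group list
    have hchunks :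
        (let r := (PySem.List.slice s (some 1) none).foldl
            (fun (acc : List (Int × Int) × Int × Int) current =>
              if current = acc.2.2 + 1 then (acc.1, acc.2.1, current)
              else (acc.1 ++ [(acc.2.1, acc.2.2)], current, current))
            ([], PySem.List.pyGetD s 0 0, PySem.List.pyGetD s 0 0);
          r.1 ++ [(r.2.1, r.2.2)])
        = ((PySem.List.enumerate s 0).splitBy
            (fun p q => p.2 - p.1 == q.2 - q.1)).map pvFirstLast := by
      rw [hcons, PySem.List.slice_from_one]
      simp only [List.tail_cons, PySem.List.pyGetD_zero_cons]
      rw [pvFoldl_eq_chunksOf rest [] x x, PySem.List.enumerate_cons]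
      simp only [List.splitBy]
      have := pvLoop_eq_chunksOf rest 0 x [] []
      simpa using this.symm
    rw [PySem.List.len_eq, PySem.List.len_eq, hlen]
    cases append_count <;>
      simp only [Bool.false_eq_true, if_false, if_true] <;>
      · refine congrArg String.ofList ?_
        rw [hchunks, List.map_map]
        rfl
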